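-- pv_equiv track=rewrite | github.com/soupday/cc_blender_tools | utils.py | safe_export_name
-- ===== SOURCE A (Python) =====
-- def strip_name(name: str):
--     """Remove any .001 from the material name"""
--     if len(name) >= 4:
--         if name[-4] == "." and name[-3:].isdigit():
--             name = name[:-4]
--     return name
--
-- def is_blender_duplicate(name):
--     if len(name) >= 4:
--         if (name[-1:].isdigit() and
--             name[-2:].isdigit() and
--             name[-3:].isdigit() and
--             name[-4] == "."):
--             return True
--     return False
--
-- def get_duplication_suffix(name):
--     if len(name) >= 4:
--         if (name[-1:].isdigit() and
--             name[-2:].isdigit() and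
--             name[-3:].isdigit() and
--             name[-4] == "."):
--             return int(name[-3:])
--     return 0
--
-- INVALID_EXPORT_CHARACTERS = "`!\"$%^&*()+-=[]{}:@~;'#<>?,./\| "
--
-- DIGITS = "0123456789"
--
-- def safe_export_name(name, is_material = False, is_split=False):
--     if is_split:
--         if is_blender_duplicate(name):
--             num = get_duplication_suffix(name)
--             name = strip_name(name) + f"_S{num:02}"
--     for char in INVALID_EXPORT_CHARACTERS:
--         if char in name:
--             name = name.replace(char, "_")
--     if is_material:
--         if name[0] in DIGITS:
--             name = f"_{name}"
--     return name
-- ===== SOURCE B (Python) =====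
-- INVALID_EXPORT_CHARACTERS = "`!\"$%^&*()+-=[]{}:@~;'#<>?,./\| "
--
-- DIGITS = "0123456789"
--
-- _INVALID_SET = set(INVALID_EXPORT_CHARACTERS)
--
-- def safe_export_name(name, is_material = False, is_split=False):
--     if is_split and len(name) >= 4 and name[-4] == "." and name[-3:].isdigit():
--         name = name[:-4] + "_S%02d" % int(name[-3:])
--     name = "".join("_" if c in _INVALID_SET else c for c in name)
--     if is_material and name and name[0] in DIGITS:
--         name = "_" + name
--     return name
-- ===== Notes on version B (the rewrite author's own statement) =====
-- stated objective: idiomatic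
-- what changed: The per-invalid-character replace loop (one full scan of name per invalid character) is replaced by a single left-to-right pass over name with set membership, and the triple duplicate-suffix check is collapsed into one guard; the replace loop disappears.
import Mathlib
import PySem

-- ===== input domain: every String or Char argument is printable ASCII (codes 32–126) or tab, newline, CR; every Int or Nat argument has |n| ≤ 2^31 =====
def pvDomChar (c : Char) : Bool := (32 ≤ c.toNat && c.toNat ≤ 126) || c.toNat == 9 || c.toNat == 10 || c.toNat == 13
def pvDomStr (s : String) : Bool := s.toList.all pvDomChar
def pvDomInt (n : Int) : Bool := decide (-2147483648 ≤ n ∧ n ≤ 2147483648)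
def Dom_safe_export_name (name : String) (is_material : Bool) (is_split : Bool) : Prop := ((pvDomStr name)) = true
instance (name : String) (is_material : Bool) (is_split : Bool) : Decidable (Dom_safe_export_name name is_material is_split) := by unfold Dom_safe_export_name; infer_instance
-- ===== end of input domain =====

-- B replaces A's per-invalid-character replace loop by one left-to-right pass over the name with set
-- membership (idiomatic single-pass sanitization); return values proved equal on Pre_.

-- ===== PORT A =====
def pvInvalidChars : String := "`!\"$%^&*()+-=[]{}:@~;'#<>?,./\\| "

def pvDigits : String := "0123456789"

-- strip_name
def pvStripName (name : String) : String :=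
  if 4 ≤ PySem.Str.len name then
    if (PySem.Str.pyGet? name (-4) == some '.') &&
       PySem.Str.strIsdigit (PySem.Str.slice name (some (-3)) none) then
      PySem.Str.slice name none (some (-4))
    else name
  else name

-- is_blender_duplicate
def pvIsBlenderDuplicate (name : String) : Bool :=
  if 4 ≤ PySem.Str.len name then
    PySem.Str.strIsdigit (PySem.Str.slice name (some (-1)) none) &&
    PySem.Str.strIsdigit (PySem.Str.slice name (some (-2)) none) &&
    PySem.Str.strIsdigit (PySem.Str.slice name (some (-3)) none) &&
    (PySem.Str.pyGet? name (-4) == some '.')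
  else false

-- get_duplication_suffix ; the .getD 0 default is unreachable: the guard ensures the slice is all digits
def pvGetDuplicationSuffix (name : String) : Int :=
  if 4 ≤ PySem.Str.len name then
    if PySem.Str.strIsdigit (PySem.Str.slice name (some (-1)) none) &&
       PySem.Str.strIsdigit (PySem.Str.slice name (some (-2)) none) &&
       PySem.Str.strIsdigit (PySem.Str.slice name (some (-3)) none) &&
       (PySem.Str.pyGet? name (-4) == some '.') then
      (PySem.Int.ofStr? (PySem.Str.slice name (some (-3)) none)).getD 0
    else 0
  else 0

-- f"{num:02}" / "%02d" % num for num ≥ 0 is zero-padding to width 2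
def pvFmtS2 (num : Int) : String := PySem.Str.zfill (PySem.Int.toStr num) 2

def safe_export_name (name : String) (is_material : Bool) (is_split : Bool) : String :=
  let name1 :=
    if is_split then
      if pvIsBlenderDuplicate name then
        String.ofList ((pvStripName name).toList ++ "_S".toList
          ++ (pvFmtS2 (pvGetDuplicationSuffix name)).toList)
      else name
    else name
  let name2 := pvInvalidChars.toList.foldl
    (fun nm ch =>
      if PySem.Str.isIn (String.ofList [ch]) nm then
        PySem.Str.replace nm (String.ofList [ch]) "_"
      else nm) name1
  if is_material then
    -- name2[0]; the .getD ' ' default is unreachable under Pre_ (Python raises IndexError there)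
    if PySem.Str.isIn (String.ofList [(PySem.Str.pyGet? name2 0).getD ' ']) pvDigits then
      String.ofList ('_' :: name2.toList)
    else name2
  else name2

-- ===== PORT B =====
def pvInvalidSet : List Char := PySem.Set.ofList pvInvalidChars.toList

def safe_export_name_alt (name : String) (is_material : Bool) (is_split : Bool) : String :=
  let name1 :=
    if is_split && decide (4 ≤ PySem.Str.len name) &&
       (PySem.Str.pyGet? name (-4) == some '.') &&
       PySem.Str.strIsdigit (PySem.Str.slice name (some (-3)) none) then
      String.ofList ((PySem.Str.slice name none (some (-4))).toList ++ "_S".toList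
        ++ (pvFmtS2 ((PySem.Int.ofStr? (PySem.Str.slice name (some (-3)) none)).getD 0)).toList)
    else name
  let name2 := String.ofList (name1.toList.map
    (fun c => if (pvInvalidSet.contains c) then '_' else c))
  if is_material && !name2.toList.isEmpty &&
     PySem.Str.isIn (String.ofList [(PySem.Str.pyGet? name2 0).getD ' ']) pvDigits then
    String.ofList ('_' :: name2.toList)
  else name2

-- ===== PRECONDITION & SPEC =====
-- A raises IndexError (name[0]) when is_material is true and name is empty; Pre_ excludes exactly that.
def Pre_safe_export_name (name : String) (is_material : Bool) (is_split : Bool) : Prop :=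
  is_material = true → name ≠ ""

instance (name : String) (is_material : Bool) (is_split : Bool) : Decidable (Pre_safe_export_name name is_material is_split) := by unfold Pre_safe_export_name; infer_instance

def pvWitness_safe_export_name : String × Bool × Bool := ("Mat 1.002", true, true)

def Spec_safe_export_name (name : String) (is_material : Bool) (is_split : Bool) (out : String) : Prop := out = safe_export_name_alt name is_material is_split
instance (name : String) (is_material : Bool) (is_split : Bool) (out : String) : Decidable (Spec_safe_export_name name is_material is_split out) := by unfold Spec_safe_export_name; infer_instance

-- ===== CLAIM (what is proved, stated in full; the proofs are below) =====
def Claim_equal_safe_export_name : Prop := ∀ (name : String) (is_material : Bool) (is_split : Bool), Dom_safe_export_name name is_material is_split → Pre_safe_export_name name is_material is_split → Spec_safe_export_name name is_material is_split (safe_export_name name is_material is_split)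

-- ===== LEMMAS AND PROOFS =====

theorem pvReplaceGoSingle (o n : Char) (l acc : List Char) (fuel : Nat) (h : l.length ≤ fuel) :
    PySem.Chars.replace.go [o] [n] fuel l acc
      = acc.reverse ++ l.map (fun x => if x = o then n else x) := by
  induction l generalizing acc fuel with
  | nil => cases fuel <;> simp [PySem.Chars.replace.go]
  | cons c t ih =>
      cases fuel with
      | zero => simp at h
      | succ fuel =>
        rw [PySem.Chars.replace.go]
        by_cases hoc : o = c
        · subst hoc
          simp only [List.isPrefixOf, BEq.rfl, Bool.and_self, if_pos, List.length_cons,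
            List.length_nil, Nat.zero_add, List.drop_succ_cons, List.drop_zero]
          rw [ih _ _ (by simpa using h)]
          simp
        · have : ([o].isPrefixOf (c :: t)) = false := by
            simp [List.isPrefixOf, hoc]
          simp only [this, Bool.false_eq_true, if_false]
          rw [ih _ _ (by simpa using h)]
          simp [Ne.symm hoc]

theorem pvReplaceSingle (o n : Char) (s : List Char) :
    PySem.Chars.replace s [o] [n] = s.map (fun x => if x = o then n else x) := by
  rw [PySem.Chars.replace]
  simp only [List.isEmpty_cons, Bool.false_eq_true, if_false]
  simpa using pvReplaceGoSingle o n s [] s.length le_rfl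

theorem pvSingletonInfix (c : Char) (l : List Char) : [c] <:+: l ↔ c ∈ l := by
  constructor
  · intro h
    exact h.sublist.subset (List.mem_singleton_self c)
  · intro h
    obtain ⟨s1, s2, rfl⟩ := List.append_of_mem h
    exact ⟨s1, s2, by simp⟩

theorem pvStepEqMap (c : Char) (s : List Char) :
    (if PySem.Chars.isIn [c] s then PySem.Chars.replace s [c] ['_'] else s)
      = s.map (fun x => if x = c then '_' else x) := by
  by_cases h : PySem.Chars.isIn [c] s = true
  · rw [if_pos h, pvReplaceSingle]
  · have h' : PySem.Chars.isIn [c] s = false := by simpa using h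
    have hc : c ∉ s := by
      intro hm
      exact (PySem.Chars.isIn_eq_false_iff [c] s).1 h' ((pvSingletonInfix c s).2 hm)
    have hmap : ∀ a ∈ s, (if a = c then '_' else a) = a := by
      intro a ha
      rw [if_neg]; rintro rfl; exact hc ha
    rw [if_neg (by simp [h']), List.map_congr_left hmap]; simp

theorem pvFoldEqMap (cs : List Char) (h : '_' ∉ cs) (s : List Char) :
    cs.foldl (fun nm ch => if PySem.Chars.isIn [ch] nm then PySem.Chars.replace nm [ch] ['_'] else nm) s
      = s.map (fun x => if x ∈ cs then '_' else x) := by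
  induction cs generalizing s with
  | nil => simp
  | cons c cs ih =>
    have h' : '_' ∉ cs := fun hm => h (List.mem_cons_of_mem _ hm)
    rw [List.foldl_cons, pvStepEqMap, ih h', List.map_map]
    apply List.map_congr_left
    intro a _
    by_cases hac : a = c
    · subst hac; simp [h']
    · simp [hac]


theorem pvFoldToList (cs : List Char) (s : String) :
    (cs.foldl (fun nm ch => if PySem.Str.isIn (String.ofList [ch]) nm then
        PySem.Str.replace nm (String.ofList [ch]) "_" else nm) s).toList
      = cs.foldl (fun nm ch => if PySem.Chars.isIn [ch] nm then
          PySem.Chars.replace nm [ch] ['_'] else nm) s.toList := by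
  induction cs generalizing s with
  | nil => rfl
  | cons c cs ih =>
    rw [List.foldl_cons, List.foldl_cons, ih]
    congr 1
    by_cases h : PySem.Chars.isIn [c] s.toList = true
    · have h' : PySem.Str.isIn (String.ofList [c]) s = true := by
        rw [PySem.Str.isIn_eq]; simpa using h
      rw [if_pos h', if_pos h, PySem.Str.toList_replace]
      simp
    · have h' : ¬ PySem.Str.isIn (String.ofList [c]) s = true := by
        rw [PySem.Str.isIn_eq]; simpa using h
      rw [if_neg h', if_neg h]

theorem pvStrIsdigitDrop (l : List Char) (a b : Nat) (hab : a ≤ b) (hb : b < l.length)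
    (h : PySem.Chars.strIsdigit (l.drop a) = true) :
    PySem.Chars.strIsdigit (l.drop b) = true := by
  have hd : l.drop b = (l.drop a).drop (b - a) := by
    rw [List.drop_drop]; congr 1; omega
  rw [PySem.Chars.strIsdigit, Bool.and_eq_true] at h ⊢
  obtain ⟨hne, hall⟩ := h
  constructor
  · have : (l.drop b).length = l.length - b := List.length_drop ..
    simp only [Bool.not_eq_true', List.isEmpty_eq_false_iff, ← List.length_pos_iff]
    omega
  · rw [hd, List.all_eq_true] at *
    intro x hx
    exact hall x (List.mem_of_mem_drop hx)

theorem pvSlice1 (name : String) :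
    PySem.Str.strIsdigit (PySem.Str.slice name (some (-1)) none)
      = PySem.Chars.strIsdigit (name.toList.drop (name.toList.length - 1)) := by
  rw [PySem.Str.strIsdigit_eq, PySem.Str.toList_slice, PySem.Chars.slice_eq_listSlice,
      PySem.List.slice_from_neg_one]

theorem pvSlice2 (name : String) :
    PySem.Str.strIsdigit (PySem.Str.slice name (some (-2)) none)
      = PySem.Chars.strIsdigit (name.toList.drop (name.toList.length - 2)) := by
  rw [PySem.Str.strIsdigit_eq, PySem.Str.toList_slice, PySem.Chars.slice_eq_listSlice,
      PySem.List.slice_from_neg_ofNat _ 2 (by norm_num)]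

theorem pvSlice3 (name : String) :
    PySem.Str.strIsdigit (PySem.Str.slice name (some (-3)) none)
      = PySem.Chars.strIsdigit (name.toList.drop (name.toList.length - 3)) := by
  rw [PySem.Str.strIsdigit_eq, PySem.Str.toList_slice, PySem.Chars.slice_eq_listSlice,
      PySem.List.slice_from_neg_ofNat _ 3 (by norm_num)]

theorem pvLen4 (name : String) (h : 4 ≤ PySem.Str.len name) : 4 ≤ name.toList.length := by
  rw [PySem.Str.len_eq] at h; exact_mod_cast h

theorem pvDigits123 (name : String) (h4 : 4 ≤ PySem.Str.len name)
    (h3 : PySem.Str.strIsdigit (PySem.Str.slice name (some (-3)) none) = true) :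
    PySem.Str.strIsdigit (PySem.Str.slice name (some (-1)) none) = true ∧
    PySem.Str.strIsdigit (PySem.Str.slice name (some (-2)) none) = true := by
  have hlen := pvLen4 name h4
  rw [pvSlice3] at h3
  constructor
  · rw [pvSlice1]; exact pvStrIsdigitDrop _ _ _ (by omega) (by omega) h3
  · rw [pvSlice2]; exact pvStrIsdigitDrop _ _ _ (by omega) (by omega) h3

theorem pvDupEq (name : String) :
    pvIsBlenderDuplicate name
      = (decide (4 ≤ PySem.Str.len name) && (PySem.Str.pyGet? name (-4) == some '.') &&
         PySem.Str.strIsdigit (PySem.Str.slice name (some (-3)) none)) := by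
  unfold pvIsBlenderDuplicate
  by_cases h4 : 4 ≤ PySem.Str.len name
  · rw [if_pos h4]
    by_cases h3 : PySem.Str.strIsdigit (PySem.Str.slice name (some (-3)) none) = true
    · obtain ⟨h1, h2⟩ := pvDigits123 name h4 h3
      have h4' : 4 ≤ name.length := by
        rw [PySem.Str.len_eq] at h4; exact_mod_cast h4
      simp at h1 h2 h3
      simp [h1, h2, h3, h4', Bool.and_comm]
    · have h3' : PySem.Str.strIsdigit (PySem.Str.slice name (some (-3)) none) = false := by
        simpa using h3
      simp at h3'
      simp [h3']
  · rw [if_neg h4]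
    have h4' : ¬ 4 ≤ name.length := by
      rw [PySem.Str.len_eq] at h4
      intro hc; exact h4 (by exact_mod_cast hc)
    simp [h4']

theorem pvStage1 (name : String) :
    (if pvIsBlenderDuplicate name then
        String.ofList ((pvStripName name).toList ++ "_S".toList
          ++ (pvFmtS2 (pvGetDuplicationSuffix name)).toList)
      else name)
    = (if decide (4 ≤ PySem.Str.len name) && (PySem.Str.pyGet? name (-4) == some '.') &&
          PySem.Str.strIsdigit (PySem.Str.slice name (some (-3)) none) then
        String.ofList ((PySem.Str.slice name none (some (-4))).toList ++ "_S".toList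
          ++ (pvFmtS2 ((PySem.Int.ofStr? (PySem.Str.slice name (some (-3)) none)).getD 0)).toList)
      else name) := by
  rw [pvDupEq]
  by_cases hC : (decide (4 ≤ PySem.Str.len name) && (PySem.Str.pyGet? name (-4) == some '.') &&
      PySem.Str.strIsdigit (PySem.Str.slice name (some (-3)) none)) = true
  · rw [if_pos hC, if_pos hC]
    have h4 : 4 ≤ PySem.Str.len name := by
      have := hC; simp only [Bool.and_eq_true, decide_eq_true_eq] at this; exact this.1.1
    have hdot : (PySem.Str.pyGet? name (-4) == some '.') = true := by
      have := hC; simp only [Bool.and_eq_true] at this; exact this.1.2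
    have h3 : PySem.Str.strIsdigit (PySem.Str.slice name (some (-3)) none) = true := by
      have := hC; simp only [Bool.and_eq_true] at this; exact this.2
    obtain ⟨h1, h2⟩ := pvDigits123 name h4 h3
    simp at hdot h1 h2 h3
    have hstrip : pvStripName name = PySem.Str.slice name none (some (-4)) := by
      unfold pvStripName
      rw [if_pos h4, if_pos (by simp; exact ⟨hdot, h3⟩)]
    have hsuf : pvGetDuplicationSuffix name
        = (PySem.Int.ofStr? (PySem.Str.slice name (some (-3)) none)).getD 0 := by
      unfold pvGetDuplicationSuffix
      rw [if_pos h4, if_pos (by simp; exact ⟨⟨⟨h1, h2⟩, h3⟩, hdot⟩)]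
    rw [hstrip, hsuf]
  · rw [if_neg hC, if_neg hC]

theorem pvStage2 (s : String) :
    pvInvalidChars.toList.foldl
      (fun nm ch => if PySem.Str.isIn (String.ofList [ch]) nm then
        PySem.Str.replace nm (String.ofList [ch]) "_" else nm) s
    = String.ofList (s.toList.map (fun c => if pvInvalidSet.contains c then '_' else c)) := by
  apply String.ext
  rw [pvFoldToList, pvFoldEqMap _ (by decide)]
  simp only [String.toList_ofList]
  apply List.map_congr_left
  intro a _
  have hmem : (pvInvalidSet.contains a) = decide (a ∈ pvInvalidChars.toList) := by
    by_cases hm : a ∈ pvInvalidChars.toList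
    · simp [hm, pvInvalidSet, PySem.Set.mem_ofList]
    · simp [hm, pvInvalidSet, PySem.Set.mem_ofList]
  rw [hmem]
  by_cases hm : a ∈ pvInvalidChars.toList <;> simp [hm]

theorem pvGuardEq (s : String) :
    (PySem.Str.isIn (String.ofList [(PySem.Str.pyGet? s 0).getD ' ']) pvDigits)
      = (!s.toList.isEmpty &&
         PySem.Str.isIn (String.ofList [(PySem.Str.pyGet? s 0).getD ' ']) pvDigits) := by
  have h0 : PySem.Str.pyGet? s 0 = s.toList[0]? := by
    simpa using PySem.Str.pyGet?_natCast s 0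
  cases hs : s.toList with
  | nil =>
    rw [h0, hs]
    simp only [List.getElem?_nil, Option.getD_none, List.isEmpty_nil, Bool.not_true, Bool.false_and]
    decide
  | cons c t => simp [hs]

theorem pvTail (s : String) (im : Bool) :
    (let name2 := pvInvalidChars.toList.foldl
        (fun nm ch => if PySem.Str.isIn (String.ofList [ch]) nm then
          PySem.Str.replace nm (String.ofList [ch]) "_" else nm) s
     if im then
       if PySem.Str.isIn (String.ofList [(PySem.Str.pyGet? name2 0).getD ' ']) pvDigits then
         String.ofList ('_' :: name2.toList)
       else name2
     else name2)
    = (let name2 := String.ofList (s.toList.map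
        (fun c => if pvInvalidSet.contains c then '_' else c))
       if im && !name2.toList.isEmpty &&
          PySem.Str.isIn (String.ofList [(PySem.Str.pyGet? name2 0).getD ' ']) pvDigits then
         String.ofList ('_' :: name2.toList)
       else name2) := by
  simp only [pvStage2]
  cases im
  · simp
  · simp only [Bool.true_and, if_true]
    conv_lhs => rw [pvGuardEq]

theorem pvMainEq (name : String) (im isp : Bool) :
    safe_export_name name im isp = safe_export_name_alt name im isp := by
  rw [safe_export_name, safe_export_name_alt]
  cases isp
  · simp only [Bool.false_eq_true, if_false, Bool.false_and]
    exact pvTail name im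
  · simp only [Bool.true_and]
    rw [pvStage1 name]
    exact pvTail _ im

theorem safe_export_name_spec : Claim_equal_safe_export_name := by
  intro name im isp _ _
  unfold Spec_safe_export_name
  exact pvMainEq name im isp
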